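-- pv_equiv track=rewrite | github.com/darshanshenoy06/Python_analyst | python_programs/fintech_domain/aml_transaction_monitor.py | aml_monitor
-- ===== SOURCE A (Python) =====
-- def aml_monitor(transactions):
--     total_transaction_amount = sum(transactions)
--     number_of_large_transactions = sum(1 for amt in transactions if amt > 100000)
--     transaction_count = len(transactions)
--
--     # AML Risk Logic
--     if total_transaction_amount > 250000:
--         risk_level = "High Risk Account"
--     elif transaction_count > 3 or number_of_large_transactions > 0:
--         risk_level = "Medium Risk"
--     else:
--         risk_level = "Low Risk"
--
--     return total_transaction_amount, number_of_large_transactions, risk_level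
-- ===== SOURCE B (Python) =====
-- def aml_monitor(transactions):
--     # Divide-and-conquer aggregation: recursively split the index range in half,
--     # combining (total, large-count) from the two halves.
--     def agg(lo, hi):
--         if hi - lo == 0:
--             return (0, 0)
--         if hi - lo == 1:
--             amt = transactions[lo]
--             return (amt, 1 if amt > 100000 else 0)
--         mid = (lo + hi) // 2
--         t1, l1 = agg(lo, mid)
--         t2, l2 = agg(mid, hi)
--         return (t1 + t2, l1 + l2)
--
--     total, large = agg(0, len(transactions))
--     if total > 250000:
--         risk = "High Risk Account"
--     elif len(transactions) > 3 or large > 0: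
--         risk = "Medium Risk"
--     else:
--         risk = "Low Risk"
--     return total, large, risk
-- ===== Notes on version B (the rewrite author's own statement) =====
-- stated objective: alternative
-- what changed: Replaces A's three independent linear scans (sum, generator count, len) with a divide-and-conquer recursion that splits the list in half and merges (total, large-count) pairs; correct because integer addition is associative, so any combination order yields the same left-to-right totals.
import Mathlib
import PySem

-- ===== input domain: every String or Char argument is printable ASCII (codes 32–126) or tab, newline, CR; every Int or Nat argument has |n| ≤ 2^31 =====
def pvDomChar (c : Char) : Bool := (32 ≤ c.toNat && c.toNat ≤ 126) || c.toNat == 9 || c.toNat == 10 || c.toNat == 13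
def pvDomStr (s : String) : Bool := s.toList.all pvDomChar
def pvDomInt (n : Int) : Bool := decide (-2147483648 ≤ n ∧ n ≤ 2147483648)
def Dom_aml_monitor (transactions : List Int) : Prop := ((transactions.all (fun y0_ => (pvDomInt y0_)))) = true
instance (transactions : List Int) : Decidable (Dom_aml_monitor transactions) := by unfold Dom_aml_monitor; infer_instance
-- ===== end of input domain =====

-- B replaces A's three independent scans by a divide-and-conquer recursion merging
-- (total, large-count) pairs from the two halves; objective: alternative.

-- ===== PORT A =====
def aml_monitor (transactions : List Int) : Int × Int × String :=
  let total_transaction_amount : Int := transactions.foldl (· + ·) 0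
  let number_of_large_transactions : Int :=
    transactions.foldl (fun acc amt => if amt > 100000 then acc + 1 else acc) 0
  let transaction_count : Int := (transactions.length : Int)
  let risk_level : String :=
    if total_transaction_amount > 250000 then "High Risk Account"
    else if transaction_count > 3 ∨ number_of_large_transactions > 0 then "Medium Risk"
    else "Low Risk"
  (total_transaction_amount, number_of_large_transactions, risk_level)

-- ===== PORT B =====
-- Source B's agg(lo, hi) works on the index range [lo, hi) of the list; here the same
-- recursion is expressed on the sublist itself (splitting at length/2 = (lo+hi)//2 - lo).
def pvAgg (xs : List Int) : Int × Int :=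
  match xs with
  | [] => (0, 0)
  | [amt] => (amt, if amt > 100000 then 1 else 0)
  | a :: b :: rest =>
    let xs' := a :: b :: rest
    let mid := xs'.length / 2
    let t1 := pvAgg (xs'.take mid)
    let t2 := pvAgg (xs'.drop mid)
    (t1.1 + t2.1, t1.2 + t2.2)
termination_by xs.length
decreasing_by
  · simp [List.length_take]; omega
  · simp [List.length_drop]; omega

def aml_monitor_alt (transactions : List Int) : Int × Int × String :=
  let tl := pvAgg transactions
  let risk : String :=
    if tl.1 > 250000 then "High Risk Account"
    else if (transactions.length : Int) > 3 ∨ tl.2 > 0 then "Medium Risk"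
    else "Low Risk"
  (tl.1, tl.2, risk)

-- ===== PRECONDITION & SPEC =====
def Spec_aml_monitor (transactions : List Int) (out : Int × Int × String) : Prop := out = aml_monitor_alt transactions
instance (transactions : List Int) (out : Int × Int × String) : Decidable (Spec_aml_monitor transactions out) := by unfold Spec_aml_monitor; infer_instance

-- ===== CLAIM (what is proved, stated in full; the proofs are below) =====
def Claim_equal_aml_monitor : Prop := ∀ (transactions : List Int), Dom_aml_monitor transactions → Spec_aml_monitor transactions (aml_monitor transactions)

-- ===== LEMMAS AND PROOFS =====

theorem foldl_sum_shift (xs : List Int) (t : Int) :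
    xs.foldl (· + ·) t = t + xs.foldl (· + ·) 0 := by
  induction xs generalizing t with
  | nil => simp
  | cons x xs ih => simp [List.foldl]; rw [ih, ih x]; ring

theorem foldl_count_shift (xs : List Int) (l : Int) :
    xs.foldl (fun (acc : Int) amt => if amt > 100000 then acc + 1 else acc) l
      = l + xs.foldl (fun (acc : Int) amt => if amt > 100000 then acc + 1 else acc) 0 := by
  induction xs generalizing l with
  | nil => simp
  | cons x xs ih =>
    simp only [List.foldl]
    rw [ih, ih (if x > 100000 then 0 + 1 else 0)]
    split_ifs <;> ring

theorem foldl_sum_append (xs ys : List Int) :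
    (xs ++ ys).foldl (· + ·) 0 = xs.foldl (· + ·) 0 + ys.foldl (· + ·) 0 := by
  rw [List.foldl_append, foldl_sum_shift]

theorem foldl_count_append (xs ys : List Int) :
    (xs ++ ys).foldl (fun (acc : Int) amt => if amt > 100000 then acc + 1 else acc) 0
      = xs.foldl (fun (acc : Int) amt => if amt > 100000 then acc + 1 else acc) 0
        + ys.foldl (fun (acc : Int) amt => if amt > 100000 then acc + 1 else acc) 0 := by
  rw [List.foldl_append]; exact foldl_count_shift ys _

theorem pvAgg_eq_aux (n : Nat) : ∀ xs : List Int, xs.length ≤ n →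
    pvAgg xs = (xs.foldl (· + ·) 0,
      xs.foldl (fun (acc : Int) amt => if amt > 100000 then acc + 1 else acc) 0) := by
  induction n with
  | zero =>
    intro xs h
    match xs with
    | [] => simp [pvAgg]
  | succ n ih =>
    intro xs h
    match xs with
    | [] => simp [pvAgg]
    | [amt] => simp [pvAgg]
    | a :: b :: rest =>
      rw [pvAgg]
      have h1 : ((a :: b :: rest).take ((a :: b :: rest).length / 2)).length ≤ n := by
        simp [List.length_take]; simp at h; omega
      have h2 : ((a :: b :: rest).drop ((a :: b :: rest).length / 2)).length ≤ n := by
        simp [List.length_drop]; simp at h; omega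
      rw [ih _ h1, ih _ h2]
      have hsplit : (a :: b :: rest).take ((a :: b :: rest).length / 2)
          ++ (a :: b :: rest).drop ((a :: b :: rest).length / 2) = a :: b :: rest :=
        List.take_append_drop _ _
      refine Prod.ext ?_ ?_ <;> simp only
      · conv_rhs => rw [← hsplit, foldl_sum_append]
      · conv_rhs => rw [← hsplit, foldl_count_append]

theorem pvAgg_eq (xs : List Int) :
    pvAgg xs = (xs.foldl (· + ·) 0,
      xs.foldl (fun (acc : Int) amt => if amt > 100000 then acc + 1 else acc) 0) :=
  pvAgg_eq_aux xs.length xs (le_refl _)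

-- ===== VERDICT (by name: the statement is the Claim_ definition above) =====
theorem aml_monitor_spec : Claim_equal_aml_monitor := by
  intro xs _
  unfold Spec_aml_monitor aml_monitor aml_monitor_alt
  simp [pvAgg_eq]
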